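-- pv_equiv track=rewrite | github.com/desaiankitb/zseeder | greini.py | parse_medications_block
-- ===== SOURCE A (Python) =====
-- from typing import Any, Dict, Iterable, List, Optional, Tuple
--
-- def parse_medications_block(value: str) -> List[Dict[str, str]]:
--     """
--     Parses the flat medication list stored in the annotations into a list of
--     descriptor/instruction pairs.
--     """
--     if not value:
--         return []
--
--     tokens = [token.strip() for token in value.split("-") if token.strip()]
--     meds: List[Dict[str, str]] = []
--     for idx in range(0, len(tokens), 2):
--         descriptor = tokens[idx]
--         instructions = tokens[idx + 1] if idx + 1 < len(tokens) else ""
--         meds.append({"descriptor": descriptor, "instructions": instructions})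
--     return meds
-- ===== SOURCE B (Python) =====
-- from typing import Any, Dict, Iterable, List, Optional, Tuple
--
-- def parse_medications_block(value: str) -> List[Dict[str, str]]:
--     """Same tokenisation as A, but pairs tokens by structural recursion on the
--     token list instead of an index loop stepping by two."""
--     if not value:
--         return []
--
--     tokens = [token.strip() for token in value.split("-") if token.strip()]
--
--     def pair(ts: List[str]) -> List[Dict[str, str]]:
--         if not ts:
--             return []
--         if len(ts) == 1:
--             return [{"descriptor": ts[0], "instructions": ""}]
--         return [{"descriptor": ts[0], "instructions": ts[1]}] + pair(ts[2:])
--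
--     return pair(tokens)
-- ===== Notes on version B (the rewrite author's own statement) =====
-- stated objective: alternative
-- what changed: Replaces the range(0, len(tokens), 2) index loop with indexing and an in-range test by a structural recursion that consumes the token list two elements at a time, so no indices or length comparisons are needed.
import Mathlib
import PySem

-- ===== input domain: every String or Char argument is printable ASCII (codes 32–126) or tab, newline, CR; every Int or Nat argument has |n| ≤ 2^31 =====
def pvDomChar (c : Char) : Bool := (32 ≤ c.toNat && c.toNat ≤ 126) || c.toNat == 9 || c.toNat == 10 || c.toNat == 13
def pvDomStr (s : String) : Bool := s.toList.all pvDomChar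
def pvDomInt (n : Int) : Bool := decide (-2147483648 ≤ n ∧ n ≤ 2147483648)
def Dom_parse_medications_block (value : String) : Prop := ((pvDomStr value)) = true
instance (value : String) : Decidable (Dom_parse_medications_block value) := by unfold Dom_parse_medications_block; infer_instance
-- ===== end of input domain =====

-- B pairs the stripped tokens by structural recursion instead of A's range(0, len, 2) index loop (objective: alternative decomposition).

-- ===== PORT A =====
def parse_medications_block (value : String) : List (List (String × String)) :=
  if value = "" then []
  else
    let tokens := (((PySem.Str.split? value "-").getD []).filter
        (fun t => PySem.Str.strip t != "")).map PySem.Str.strip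
    (PySem.List.pyRange 0 (tokens.length : Int) 2).foldl
      (fun meds idx =>
        let descriptor := (PySem.List.pyGet? tokens idx).getD ""
        let instructions := if idx + 1 < (tokens.length : Int) then
            (PySem.List.pyGet? tokens (idx + 1)).getD "" else ""
        meds ++ [[("descriptor", descriptor), ("instructions", instructions)]])
      []

-- ===== PORT B =====
def pairTokens : List String → List (List (String × String))
  | [] => []
  | [d] => [[("descriptor", d), ("instructions", "")]]
  | d :: i :: rest => [("descriptor", d), ("instructions", i)] :: pairTokens rest

def parse_medications_block_alt (value : String) : List (List (String × String)) :=
  if value = "" then []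
  else
    pairTokens ((((PySem.Str.split? value "-").getD []).filter
        (fun t => PySem.Str.strip t != "")).map PySem.Str.strip)

-- ===== PRECONDITION & SPEC =====
def Spec_parse_medications_block (value : String) (out : List (List (String × String))) : Prop := out = parse_medications_block_alt value
instance (value : String) (out : List (List (String × String))) : Decidable (Spec_parse_medications_block value out) := by unfold Spec_parse_medications_block; infer_instance

-- ===== CLAIM (what is proved, stated in full; the proofs are below) =====
def Claim_equal_parse_medications_block : Prop := ∀ (value : String), Dom_parse_medications_block value → Spec_parse_medications_block value (parse_medications_block value)

-- ===== LEMMAS AND PROOFS =====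

lemma pyGetN {α : Type} (xs : List α) (k : ℕ) :
    PySem.List.pyGet? xs (k : ℤ) = xs[k]? := PySem.List.pyGet?_natCast xs k

lemma range_two (n : ℕ) :
    PySem.List.pyRange 0 (n : ℤ) 2 = (List.range ((n + 1) / 2)).map (fun k : ℕ => 2 * (k : ℤ)) := by
  rw [PySem.List.pyRange_of_pos 0 (n : ℤ) (by norm_num)]
  have hc : (if (0 : ℤ) < (n : ℤ) then (((n : ℤ) - 0 + 2 - 1) / 2).toNat else 0) = (n + 1) / 2 := by
    split <;> omega
  rw [hc]
  exact List.map_congr_left (fun k _ => by ring)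

lemma loop_go (ts : List String) :
    ∀ acc : List (List (String × String)),
    (List.range ((ts.length + 1) / 2)).foldl
      (fun meds k =>
        meds ++ [[("descriptor", (PySem.List.pyGet? ts ((2 * k : ℕ) : ℤ)).getD ""),
                  ("instructions", if ((2 * k : ℕ) : ℤ) + 1 < (ts.length : ℤ) then
                      (PySem.List.pyGet? ts (((2 * k : ℕ) : ℤ) + 1)).getD "" else "")]])
      acc = acc ++ pairTokens ts := by
  induction ts using pairTokens.induct with
  | case1 =>
      intro acc
      simp [pairTokens]
  | case2 d =>
      intro acc
      simp [pairTokens, List.range_one]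
  | case3 d i rest ih =>
      intro acc
      have hlen : ((d :: i :: rest).length + 1) / 2 = (rest.length + 1) / 2 + 1 := by
        simp [List.length_cons]; omega
      rw [hlen, List.range_succ_eq_map, List.foldl_cons, List.foldl_map]
      have hfun :
          (fun (meds : List (List (String × String))) (k : ℕ) =>
            meds ++ [[("descriptor", (PySem.List.pyGet? (d :: i :: rest) ((2 * (k + 1) : ℕ) : ℤ)).getD ""),
                      ("instructions", if ((2 * (k + 1) : ℕ) : ℤ) + 1 < ((d :: i :: rest).length : ℤ) then
                          (PySem.List.pyGet? (d :: i :: rest) (((2 * (k + 1) : ℕ) : ℤ) + 1)).getD "" else "")]])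
          = (fun (meds : List (List (String × String))) (k : ℕ) =>
            meds ++ [[("descriptor", (PySem.List.pyGet? rest ((2 * k : ℕ) : ℤ)).getD ""),
                      ("instructions", if ((2 * k : ℕ) : ℤ) + 1 < (rest.length : ℤ) then
                          (PySem.List.pyGet? rest (((2 * k : ℕ) : ℤ) + 1)).getD "" else "")]]) := by
        funext meds k
        have e2 : (((2 * (k + 1) : ℕ) : ℤ) + 1) = ((2 * k + 3 : ℕ) : ℤ) := by push_cast; ring
        have e4 : (((2 * k : ℕ) : ℤ) + 1) = ((2 * k + 1 : ℕ) : ℤ) := by push_cast; ring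
        rw [e2, e4, pyGetN, pyGetN, pyGetN, pyGetN]
        rw [show (2 * (k + 1) : ℕ) = (2 * k + 1) + 1 from by omega]
        rw [show (2 * k + 3 : ℕ) = (2 * k + 1) + 1 + 1 from rfl]
        simp only [List.getElem?_cons_succ, List.length_cons, Nat.cast_lt]
        rw [show (2 * k + 1 + 1 + 1 : ℕ) = (2 * k + 1) + 2 from rfl,
            show rest.length + 1 + 1 = rest.length + 2 from rfl]
        simp only [Nat.add_lt_add_iff_right]
      rw [hfun, ih]
      have hc : (((2 * 0 : ℕ) : ℤ) + 1 < ((d :: i :: rest).length : ℤ)) := by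
        simp [List.length_cons]
      rw [if_pos hc]
      have g1 : PySem.List.pyGet? (d :: i :: rest) ((2 * 0 : ℕ) : ℤ) = some d := by
        rw [pyGetN]; rfl
      have g2 : PySem.List.pyGet? (d :: i :: rest) (((2 * 0 : ℕ) : ℤ) + 1) = some i := by
        rw [show (((2 * 0 : ℕ) : ℤ) + 1) = ((1 : ℕ) : ℤ) from by norm_num, pyGetN]
        rfl
      rw [g1, g2]
      simp [pairTokens, List.append_assoc]

lemma loop_eq (ts : List String) :
    (PySem.List.pyRange 0 (ts.length : Int) 2).foldl
      (fun meds idx =>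
        meds ++ [[("descriptor", (PySem.List.pyGet? ts idx).getD ""),
                  ("instructions", if idx + 1 < (ts.length : Int) then
                      (PySem.List.pyGet? ts (idx + 1)).getD "" else "")]])
      [] = pairTokens ts := by
  rw [range_two, List.foldl_map]
  have := loop_go ts []
  simpa using this

-- ===== VERDICT (by name: the statement is the Claim_ definition above) =====
theorem parse_medications_block_spec : Claim_equal_parse_medications_block := by
  intro value _
  unfold Spec_parse_medications_block parse_medications_block parse_medications_block_alt
  by_cases h : value = ""
  · simp [h]
  · simp only [if_neg h]
    exact loop_eq _
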